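-- pv_equiv track=rewrite | github.com/scarpel/ada | engine/Utils/htmlUtils.py | get_text_from_tag
-- ===== SOURCE A (Python) =====
-- def get_text_from_tag(text):
--     start = text.find(">")
--     texts = []
--
--     while(start != -1):
--         start = start + 1
--         end = text.find("<", start)
--
--         if(end != -1 and end>start):
--             t = text[start:end].strip()
--             if(t): texts.append(t)
--             start = text.find(">", end+1)
--         else: start = text.find(">", start)
--
--     return "".join(texts)
-- ===== SOURCE B (Python) =====
-- def get_text_from_tag(text):
--     # one-pass character state machine: outside tags until '>', buffer until '<', flush stripped non-empty chunks
--     out = []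
--     buf = None  # None = not inside a '>...<' chunk
--     for ch in text:
--         if buf is None:
--             if ch == '>':
--                 buf = []
--         elif ch == '<':
--             s = ''.join(buf).strip()
--             if s:
--                 out.append(s)
--             buf = None
--         else:
--             buf.append(ch)
--     return ''.join(out)
-- ===== Notes on version B (the rewrite author's own statement) =====
-- stated objective: alternative
-- what changed: Replaced the repeated text.find scans with index bookkeeping by a single left-to-right character state machine (outside/inside a '>...<' chunk) that buffers, strips and flushes chunks in one pass.
import Mathlib
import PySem

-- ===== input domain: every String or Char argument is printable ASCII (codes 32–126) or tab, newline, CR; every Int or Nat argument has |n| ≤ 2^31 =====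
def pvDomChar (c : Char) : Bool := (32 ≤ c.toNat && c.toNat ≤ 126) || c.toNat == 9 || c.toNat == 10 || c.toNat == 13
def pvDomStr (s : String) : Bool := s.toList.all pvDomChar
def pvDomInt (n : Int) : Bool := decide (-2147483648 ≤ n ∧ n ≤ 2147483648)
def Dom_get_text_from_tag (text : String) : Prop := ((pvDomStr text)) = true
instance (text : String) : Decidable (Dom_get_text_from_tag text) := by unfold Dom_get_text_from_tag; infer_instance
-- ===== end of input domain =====

-- B replaces A's repeated `find`-and-index scanning with a single left-to-right character state
-- machine (outside / inside a '>…<' chunk) that buffers, strips and flushes chunks in one pass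
-- (alternative decomposition; same asymptotic cost).


-- ===== PORT A =====
-- the while loop; `fuel` only makes it total: each iteration strictly advances `start`
-- (or sets it to -1), so `cs.length + 2` iterations always suffice — proved in `aLoop_spec` below.
def aLoop (fuel : Nat) (cs : List Char) (start : Int) (texts : List (List Char)) : List (List Char) :=
  match fuel with
  | 0 => texts
  | fuel' + 1 =>
    if start = -1 then texts
    else
      let start1 := start + 1                                      -- start = start + 1
      let e := PySem.Chars.findFrom cs ['<'] start1 none           -- end = text.find("<", start)
      if e ≠ -1 ∧ start1 < e then
        let t := PySem.Chars.strip (PySem.List.slice cs (some start1) (some e))  -- t = text[start:end].strip()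
        aLoop fuel' cs (PySem.Chars.findFrom cs ['>'] (e + 1) none)              -- start = text.find(">", end+1)
          (if t ≠ [] then texts ++ [t] else texts)                               -- if(t): texts.append(t)
      else aLoop fuel' cs (PySem.Chars.findFrom cs ['>'] start1 none) texts      -- start = text.find(">", start)

def get_text_from_tag (text : String) : String :=
  let cs := text.toList
  String.mk (PySem.Chars.join [] (aLoop (cs.length + 2) cs (PySem.Chars.find cs ['>']) []))

-- ===== PORT B =====
-- one fold step of the state machine: state = (out, buf); buf = none ⇔ not inside a '>…<' chunk
def bStep (st : List (List Char) × Option (List Char)) (ch : Char) :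
    List (List Char) × Option (List Char) :=
  match st with
  | (out, none) => if ch = '>' then (out, some []) else (out, none)
  | (out, some buf) =>
    if ch = '<' then
      let s := PySem.Chars.strip buf
      (if s ≠ [] then out ++ [s] else out, none)
    else (out, some (buf ++ [ch]))

def get_text_from_tag_alt (text : String) : String :=
  String.mk (PySem.Chars.join [] (text.toList.foldl bStep ([], none)).1)

-- ===== PRECONDITION & SPEC =====
def Spec_get_text_from_tag (text : String) (out : String) : Prop := out = get_text_from_tag_alt text
instance (text : String) (out : String) : Decidable (Spec_get_text_from_tag text out) := by unfold Spec_get_text_from_tag; infer_instance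

-- ===== CLAIM (what is proved, stated in full; the proofs are below) =====
def Claim_equal_get_text_from_tag : Prop := ∀ (text : String), Dom_get_text_from_tag text → Spec_get_text_from_tag text (get_text_from_tag text)

-- ===== LEMMAS AND PROOFS =====

-- `neq c` is the scanning predicate "not yet at the character c"
def neq (c : Char) : Char → Bool := fun x => x ≠ c

-- reference chunk list: skip to the first '>', take up to the first following '<',
-- keep the stripped chunk if non-empty, continue after that '<'
def specChunks (cs : List Char) : List (List Char) :=
  match h : cs.dropWhile (neq '>') with
  | [] => []
  | _ :: tail =>
    match h2 : tail.dropWhile (neq '<') with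
    | [] => []
    | _ :: rest =>
      let t := PySem.Chars.strip (tail.takeWhile (neq '<'))
      if t ≠ [] then t :: specChunks rest else specChunks rest
termination_by cs.length
decreasing_by
  all_goals
    have h1 : (cs.dropWhile (neq '>')).length ≤ cs.length := List.length_dropWhile_le _ cs
    have h2' : (tail.dropWhile (neq '<')).length ≤ tail.length := List.length_dropWhile_le _ tail
    rw [h] at h1
    rw [h2] at h2'
    simp at h1 h2'
    omega

-- the chunk list seen from inside a chunk whose buffered prefix is `buf`
def spec2 (buf cs : List Char) : List (List Char) :=
  match cs.dropWhile (neq '<') with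
  | [] => []
  | _ :: rest =>
    let t := PySem.Chars.strip (buf ++ cs.takeWhile (neq '<'))
    if t ≠ [] then t :: specChunks rest else specChunks rest

theorem specChunks_eq_nil (cs : List Char) (h : cs.dropWhile (neq '>') = []) :
    specChunks cs = [] := by
  rw [specChunks.eq_def]
  split
  · rfl
  · rename_i g tail heq
    rw [h] at heq
    simp at heq

theorem specChunks_gt (cs : List Char) (g : Char) (tail : List Char)
    (h : cs.dropWhile (neq '>') = g :: tail) : specChunks cs = spec2 [] tail := by
  rw [specChunks.eq_def]
  split
  · rename_i heq
    rw [h] at heq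
    simp at heq
  · rename_i g' tail' heq
    rw [h] at heq
    injection heq with h1 h2
    subst h2
    split
    · rename_i heq2
      simp [spec2, heq2]
    · rename_i l rest heq2
      simp [spec2, heq2]

theorem specChunks_cons_ne (c : Char) (cs : List Char) (h : c ≠ '>') :
    specChunks (c :: cs) = specChunks cs := by
  have hdw : (c :: cs).dropWhile (neq '>') = cs.dropWhile (neq '>') := by
    simp [List.dropWhile_cons, neq, h]
  cases hcs : cs.dropWhile (neq '>') with
  | nil => rw [specChunks_eq_nil _ (hdw.trans hcs), specChunks_eq_nil _ hcs]
  | cons g tail => rw [specChunks_gt _ g tail (hdw.trans hcs), specChunks_gt _ g tail hcs]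

theorem specChunks_nil_of_no_lt (cs : List Char) (h : '<' ∉ cs) : specChunks cs = [] := by
  cases hdw : cs.dropWhile (neq '>') with
  | nil => exact specChunks_eq_nil _ hdw
  | cons g tail =>
    rw [specChunks_gt _ g tail hdw]
    have htail : tail.dropWhile (neq '<') = [] := by
      rw [List.dropWhile_eq_nil_iff]
      intro x hx
      have hx1 : x ∈ cs.dropWhile (neq '>') := hdw ▸ List.mem_cons_of_mem g hx
      have hxcs : x ∈ cs := (List.dropWhile_suffix (l := cs) (p := neq '>')).mem hx1
      have : x ≠ '<' := fun hxe => h (hxe ▸ hxcs)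
      simp [neq, this]
    simp [spec2, htail]

theorem drop_len_takeWhile (p : Char → Bool) (cs : List Char) :
    cs.drop (cs.takeWhile p).length = cs.dropWhile p := by
  have h := List.takeWhile_append_dropWhile (p := p) (l := cs)
  have h2 : List.drop (cs.takeWhile p).length (cs.takeWhile p ++ cs.dropWhile p) = cs.dropWhile p :=
    List.drop_left ..
  rw [h] at h2; exact h2

theorem first_occ (c : Char) (cs : List Char) (h : c ∈ cs) :
    (cs.takeWhile (neq c)).length < cs.length ∧
      cs.dropWhile (neq c) = c :: cs.drop ((cs.takeWhile (neq c)).length + 1) := by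
  have hne : cs.dropWhile (neq c) ≠ [] := by
    intro hnil
    have := List.dropWhile_eq_nil_iff.mp hnil c h
    simp [neq] at this
  have hlt : (cs.takeWhile (neq c)).length < cs.length := by
    by_contra hle
    rw [← drop_len_takeWhile (neq c) cs] at hne
    exact hne (List.drop_eq_nil_iff.mpr (by omega))
  have hhead := List.head_dropWhile_not (neq c) hne
  have hc : (cs.dropWhile (neq c)).head hne = c := by
    simpa [neq] using hhead
  refine ⟨hlt, ?_⟩
  have hsplit := List.cons_head_tail (l := cs.dropWhile (neq c)) hne
  rw [← hsplit, hc]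
  congr 1
  rw [← drop_len_takeWhile (neq c) cs, List.tail_drop]

theorem find_single (c : Char) (cs : List Char) :
    PySem.Chars.find cs [c] =
      if c ∈ cs then ((cs.takeWhile (neq c)).length : Int) else -1 := by
  by_cases h : c ∈ cs
  · simp only [h, if_true]
    have hinf : [c] <:+: cs := (List.singleton_infix_iff c cs).mpr h
    have hnn : 0 ≤ PySem.Chars.find cs [c] := (PySem.Chars.find_nonneg_iff cs [c]).mpr hinf
    obtain ⟨hpre, hmin⟩ := PySem.Chars.find_spec hnn
    set f := (PySem.Chars.find cs [c]).toNat with hf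
    set w := (cs.takeWhile (neq c)).length with hw
    obtain ⟨hlt, hdrop⟩ := first_occ c cs h
    have hprew : [c] <+: cs.drop w := by
      rw [drop_len_takeWhile (neq c) cs, hdrop]
      exact ⟨_, rfl⟩
    have hfw : f ≤ w := by
      by_contra hgt
      exact hmin w (by omega) hprew
    have hwf : w ≤ f := by
      by_contra hgt
      -- f < w : position f lies inside the takeWhile prefix, so cs[f] ≠ c, but the prefix says cs[f] = c
      obtain ⟨t, ht⟩ := hpre
      have hflen : f < cs.length := by omega
      have hcf : cs[f] = c := by
        have hdf : cs.drop f = cs[f] :: cs.drop (f + 1) := List.drop_eq_getElem_cons hflen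
        have hct : cs.drop f = c :: t := by simpa using ht.symm
        rw [hdf] at hct
        exact (List.cons.injEq .. ▸ hct).1
      have hmemtw : cs[f] ∈ cs.takeWhile (neq c) := by
        have htake : cs.takeWhile (neq c) = cs.take w :=
          List.prefix_iff_eq_take.mp (List.takeWhile_prefix _)
        rw [htake]
        have hg : (cs.take w)[f]'(by simp; omega) = cs[f] := by simp
        exact hg ▸ (cs.take w).getElem_mem _
      have hp := List.mem_takeWhile_imp hmemtw
      rw [hcf] at hp
      simp [neq] at hp
    have : f = w := by omega
    omega
  · simp only [h, if_false]
    exact (PySem.Chars.find_eq_neg_one_iff cs [c]).mpr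
      (fun hinf => h ((List.singleton_infix_iff c cs).mp hinf))

theorem strip_nil : PySem.Chars.strip [] = [] := by decide

-- ===== A-side: the fuelled find-loop computes specChunks =====
theorem aLoop_spec : ∀ (fuel : Nat) (cs : List Char) (p : Nat) (texts : List (List Char)),
    p ≤ cs.length → cs.length + 1 - p ≤ fuel →
    aLoop fuel cs (PySem.Chars.findFrom cs ['>'] (p : Int) none) texts
      = texts ++ specChunks (cs.drop p) := by
  intro fuel
  induction fuel with
  | zero => intro cs p texts hp hf; omega
  | succ fuel ih =>
    intro cs p texts hp hf
    rw [PySem.Chars.findFrom_natCast cs ['>'] p hp]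
    by_cases hmem : '>' ∈ cs.drop p
    · set s0 := ((cs.drop p).takeWhile (neq '>')).length with hs0
      obtain ⟨hs0lt, hs0drop⟩ := first_occ '>' (cs.drop p) hmem
      rw [← hs0] at hs0lt hs0drop
      have hs0len : s0 < cs.length - p := by simpa using hs0lt
      have hfind1 : PySem.Chars.find (cs.drop p) ['>'] = (s0 : Int) := by
        rw [find_single]; simp [hmem, hs0]
      rw [hfind1, if_neg (by omega : ¬ ((s0 : Int) = -1))]
      have hps : (p : Int) + (s0 : Int) = ((p + s0 : Nat) : Int) := by push_cast; ring
      rw [hps]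
      set s := p + s0 with hs
      have hgtdrop : (cs.drop p).dropWhile (neq '>') = '>' :: cs.drop (s + 1) := by
        rw [hs0drop, List.drop_drop, ← Nat.add_assoc]
      rw [aLoop]
      rw [if_neg (by omega : ¬ ((s : Nat) : Int) = -1)]
      have hcast1 : ((s : Nat) : Int) + 1 = ((s + 1 : Nat) : Int) := by push_cast; ring
      simp only [hcast1]
      have hs1le : s + 1 ≤ cs.length := by omega
      rw [PySem.Chars.findFrom_natCast cs ['<'] (s + 1) hs1le]
      by_cases hmem2 : '<' ∈ cs.drop (s + 1)
      · set q := ((cs.drop (s + 1)).takeWhile (neq '<')).length with hq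
        obtain ⟨hqlt, hqdrop⟩ := first_occ '<' (cs.drop (s + 1)) hmem2
        rw [← hq] at hqlt hqdrop
        have hqlen : q < cs.length - (s + 1) := by simpa using hqlt
        have hfind2 : PySem.Chars.find (cs.drop (s + 1)) ['<'] = (q : Int) := by
          rw [find_single]; simp [hmem2, hq]
        rw [hfind2, if_neg (by omega : ¬ ((q : Int) = -1))]
        have hltdrop : (cs.drop (s + 1)).dropWhile (neq '<') = '<' :: cs.drop (s + q + 2) := by
          rw [hqdrop]
          congr 1
          rw [List.drop_drop]
          congr 1
          omega
        have hcast2 : ((s + 1 : Nat) : Int) + (q : Int) = ((s + 1 + q : Nat) : Int) := by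
          push_cast; ring
        rw [hcast2]
        rcases Nat.eq_zero_or_pos q with hq0 | hqpos
        · -- the '<' is immediately after the '>': empty chunk, A keeps scanning from the '<'
          rw [if_neg (by omega :
            ¬ (((s + 1 + q : Nat) : Int) ≠ -1 ∧ ((s + 1 : Nat) : Int) < ((s + 1 + q : Nat) : Int)))]
          rw [ih cs (s + 1) texts hs1le (by omega)]
          have htwnil : (cs.drop (s + 1)).takeWhile (neq '<') = [] :=
            List.length_eq_zero_iff.mp (by omega)
          have hdrop1 : cs.drop (s + 1) = '<' :: cs.drop (s + q + 2) := by
            have happ := List.takeWhile_append_dropWhile (p := neq '<') (l := cs.drop (s + 1))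
            rw [htwnil] at happ
            simp only [List.nil_append] at happ
            rw [← happ]
            exact hltdrop
          rw [specChunks_gt _ '>' (cs.drop (s + 1)) hgtdrop]
          have hsp : spec2 [] (cs.drop (s + 1)) = specChunks (cs.drop (s + q + 2)) := by
            simp [spec2, hltdrop, htwnil, strip_nil]
          rw [hsp, hdrop1, specChunks_cons_ne '<' _ (by decide)]
        · -- proper chunk text[s+1 : s+1+q]
          rw [if_pos (⟨by omega, by omega⟩ :
            ((s + 1 + q : Nat) : Int) ≠ -1 ∧ ((s + 1 : Nat) : Int) < ((s + 1 + q : Nat) : Int))]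
          rw [PySem.List.slice_natCast cs (s + 1) (s + 1 + q)]
          have hsub : s + 1 + q - (s + 1) = q := by omega
          rw [hsub]
          have htake : (cs.drop (s + 1)).take q = (cs.drop (s + 1)).takeWhile (neq '<') := by
            have hpr := List.prefix_iff_eq_take.mp
              (List.takeWhile_prefix (l := cs.drop (s + 1)) (p := neq '<'))
            rw [hpr, ← hq]
          rw [htake]
          have hcast3 : ((s + 1 + q : Nat) : Int) + 1 = ((s + q + 2 : Nat) : Int) := by
            push_cast; ring
          rw [hcast3]
          rw [ih cs (s + q + 2) _ (by omega) (by omega)]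
          rw [specChunks_gt _ '>' (cs.drop (s + 1)) hgtdrop]
          have hspec2 : spec2 [] (cs.drop (s + 1)) =
              (if PySem.Chars.strip ((cs.drop (s + 1)).takeWhile (neq '<')) ≠ [] then
                 PySem.Chars.strip ((cs.drop (s + 1)).takeWhile (neq '<'))
                   :: specChunks (cs.drop (s + q + 2))
               else specChunks (cs.drop (s + q + 2))) := by
            simp [spec2, hltdrop]
          rw [hspec2]
          by_cases ht : PySem.Chars.strip ((cs.drop (s + 1)).takeWhile (neq '<')) = []
          · simp [ht]
          · simp [ht]
      · have hfind2 : PySem.Chars.find (cs.drop (s + 1)) ['<'] = -1 := by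
          rw [find_single]; simp [hmem2]
        rw [hfind2, if_pos rfl]
        rw [if_neg (by simp : ¬ ((-1 : Int) ≠ -1 ∧ ((s + 1 : Nat) : Int) < -1))]
        rw [ih cs (s + 1) texts hs1le (by omega)]
        rw [specChunks_nil_of_no_lt (cs.drop (s + 1)) hmem2]
        rw [specChunks_gt _ '>' (cs.drop (s + 1)) hgtdrop]
        have htail : (cs.drop (s + 1)).dropWhile (neq '<') = [] := by
          rw [List.dropWhile_eq_nil_iff]
          intro x hx
          have : x ≠ '<' := fun hxe => hmem2 (hxe ▸ hx)
          simp [neq, this]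
        simp [spec2, htail]
    · have hfind1 : PySem.Chars.find (cs.drop p) ['>'] = -1 := by
        rw [find_single]; simp [hmem]
      rw [hfind1, if_pos rfl, aLoop, if_pos rfl]
      have hdw : (cs.drop p).dropWhile (neq '>') = [] := by
        rw [List.dropWhile_eq_nil_iff]
        intro x hx
        have : x ≠ '>' := fun hxe => hmem (hxe ▸ hx)
        simp [neq, this]
      rw [specChunks_eq_nil _ hdw]
      simp

-- ===== B-side: the fold computes specChunks =====
theorem bFold_spec : ∀ (n : Nat) (cs : List Char), cs.length ≤ n →
    (∀ out, (cs.foldl bStep (out, none)).1 = out ++ specChunks cs) ∧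
    (∀ out buf, (cs.foldl bStep (out, some buf)).1 = out ++ spec2 buf cs) := by
  intro n
  induction n with
  | zero =>
    intro cs hcs
    have : cs = [] := List.length_eq_zero_iff.mp (by omega)
    subst this
    constructor
    · intro out; rw [specChunks_eq_nil [] (by simp)]; simp
    · intro out buf; simp [spec2]
  | succ n ih =>
    intro cs hcs
    match cs with
    | [] =>
      constructor
      · intro out; rw [specChunks_eq_nil [] (by simp)]; simp
      · intro out buf; simp [spec2]
    | c :: cs' =>
      have hlen : cs'.length ≤ n := by simpa using hcs
      constructor
      · intro out
        by_cases hc : c = '>'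
        · subst hc
          rw [List.foldl_cons]
          have hstep : bStep (out, none) '>' = (out, some []) := by simp [bStep]
          rw [hstep, (ih cs' hlen).2]
          rw [specChunks_gt ('>' :: cs') '>' cs' (by simp [List.dropWhile_cons, neq])]
        · rw [List.foldl_cons]
          have hstep : bStep (out, none) c = (out, none) := by simp [bStep, hc]
          rw [hstep, (ih cs' hlen).1, specChunks_cons_ne c cs' hc]
      · intro out buf
        by_cases hc : c = '<'
        · subst hc
          rw [List.foldl_cons]
          have hdw : ('<' :: cs').dropWhile (neq '<') = '<' :: cs' := by
            simp [List.dropWhile_cons, neq]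
          have htw : ('<' :: cs').takeWhile (neq '<') = [] := by
            simp [List.takeWhile_cons, neq]
          by_cases hs : PySem.Chars.strip buf = []
          · have hstep : bStep (out, some buf) '<' = (out, none) := by
              simp [bStep, hs]
            rw [hstep, (ih cs' hlen).1]
            simp [spec2, hdw, htw, hs]
          · have hstep : bStep (out, some buf) '<' = (out ++ [PySem.Chars.strip buf], none) := by
              simp [bStep, hs]
            rw [hstep, (ih cs' hlen).1]
            simp [spec2, hdw, htw, hs]
        · rw [List.foldl_cons]
          have hstep : bStep (out, some buf) c = (out, some (buf ++ [c])) := by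
            simp [bStep, hc]
          rw [hstep, (ih cs' hlen).2]
          have hdw : (c :: cs').dropWhile (neq '<') = cs'.dropWhile (neq '<') := by
            simp [List.dropWhile_cons, neq, hc]
          have htw : (c :: cs').takeWhile (neq '<') = c :: cs'.takeWhile (neq '<') := by
            simp [List.takeWhile_cons, neq, hc]
          cases hd : cs'.dropWhile (neq '<') with
          | nil => simp [spec2, hdw, htw, hd]
          | cons l rest => simp [spec2, hdw, htw, hd, List.append_assoc]

-- ===== VERDICT (by name: the statement is the Claim_ definition above) =====
theorem get_text_from_tag_spec : Claim_equal_get_text_from_tag := by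
  intro text _
  unfold Spec_get_text_from_tag get_text_from_tag get_text_from_tag_alt
  have hA : aLoop (text.toList.length + 2) text.toList (PySem.Chars.find text.toList ['>']) []
      = specChunks text.toList := by
    have h0 := aLoop_spec (text.toList.length + 2) text.toList 0 [] (by omega) (by omega)
    simpa [PySem.Chars.findFrom_zero] using h0
  have hB := (bFold_spec text.toList.length text.toList le_rfl).1 []
  simp only [hA, hB, List.nil_append]
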